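-- pv_equiv track=rewrite | github.com/DiasKarol/Python | PythonAvancado/aula07e08/exercicio08.py | count_up
-- ===== SOURCE A (Python) =====
-- from typing import Generator
--
-- def count_up(x: int) -> Generator[int, None, None]:
--     "Gera números inteiros de 1 a x de forma crescente, onde a diferença entre um termo da sequência e o anterior aumenta em uma unidade. Retorna -> Generator[int, None, None]: Um gerador de números inteiros."
--
--     n = 1 #Inicializa a sequência
--     diff = 1 #Diferença (iniciado em 1)
--     count = n #Contador
--     while count < x:
--         yield n
--         n += diff
--         count = n
--         diff += 1
-- ===== SOURCE B (Python) =====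
-- def _term(k):
--     return 1 + k * (k + 1) // 2
--
-- def count_up(x: int):
--     "Conta primeiro quantos termos (indices m com _term(m) < x) e entao gera cada termo pelo indice."
--     m = 0
--     while _term(m) < x:
--         m += 1
--     yield from (_term(k) for k in range(m))
-- ===== Notes on version B (the rewrite author's own statement) =====
-- stated objective: alternative
-- what changed: B is two staged passes: it first counts the number of terms m by advancing an index against the closed form 1+k*(k+1)//2, then yields the terms by mapping that closed form over range(m), instead of A's single loop carrying a running value and a growing step accumulator.
import Mathlib
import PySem

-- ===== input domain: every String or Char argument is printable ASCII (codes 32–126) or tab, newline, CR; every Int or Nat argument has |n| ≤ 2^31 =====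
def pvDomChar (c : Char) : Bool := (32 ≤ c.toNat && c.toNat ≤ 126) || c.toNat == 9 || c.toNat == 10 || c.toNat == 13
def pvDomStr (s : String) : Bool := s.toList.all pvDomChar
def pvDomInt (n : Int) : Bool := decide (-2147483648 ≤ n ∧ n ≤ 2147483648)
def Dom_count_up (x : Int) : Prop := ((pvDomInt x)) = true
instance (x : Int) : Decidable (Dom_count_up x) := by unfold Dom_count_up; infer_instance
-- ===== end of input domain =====

-- B first counts the number of terms by index against the closed form 1 + k*(k+1)//2, then maps that closed form over range(m) — a staged-passes alternative to A's single accumulating loop (same cost).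


-- ===== PORT A =====
-- A's while loop; the Nat fuel only makes the recursion total (since diff ≥ 1 on every
-- call, (x - 1).toNat iterations always suffice).
def count_up_loopA (fuel : Nat) (x n diff : Int) : List Int :=
  match fuel with
  | 0 => []
  | fuel + 1 => if n < x then n :: count_up_loopA fuel x (n + diff) (diff + 1) else []

def count_up (x : Int) : List Int := count_up_loopA (x - 1).toNat x 1 1

-- ===== PORT B =====
-- B's helper _term(k) = 1 + k*(k+1)//2.
def pvTerm (k : Int) : Int := 1 + PySem.Int.floordiv (k * (k + 1)) 2

-- B's counting while-loop (fuel only for totality; _term m grows by ≥ 1 per step from m = 0).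
def count_up_countB (fuel : Nat) (x m : Int) : Int :=
  match fuel with
  | 0 => m
  | fuel + 1 => if pvTerm m < x then count_up_countB fuel x (m + 1) else m

def count_up_alt (x : Int) : List Int :=
  (PySem.List.pyRange 0 (count_up_countB (x - 1).toNat x 0) 1).map pvTerm

-- ===== PRECONDITION & SPEC =====
def Spec_count_up (x : Int) (out : List Int) : Prop := out = count_up_alt x
instance (x : Int) (out : List Int) : Decidable (Spec_count_up x out) := by unfold Spec_count_up; infer_instance

-- ===== CLAIM (what is proved, stated in full; the proofs are below) =====
def Claim_equal_count_up : Prop := ∀ (x : Int), Dom_count_up x → Spec_count_up x (count_up x)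

-- ===== LEMMAS AND PROOFS =====

-- B's counting loop never decreases its index.
theorem count_up_countB_ge (fuel : Nat) (x m : Int) : m ≤ count_up_countB fuel x m := by
  induction fuel generalizing m with
  | zero => simp [count_up_countB]
  | succ fuel ih =>
    simp only [count_up_countB]
    split
    · exact le_trans (by omega) (ih (m + 1))
    · exact le_rfl

-- For k ≥ 0, A's loop started at state (n, diff) = (pvTerm k, k + 1) produces exactly
-- pvTerm mapped over the indices k, …, count_up_countB fuel x k - 1.
theorem count_up_loop_eq (fuel : Nat) (x k : Int) (hk : 0 ≤ k) :
    count_up_loopA fuel x (pvTerm k) (k + 1) =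
    (PySem.List.pyRange k (count_up_countB fuel x k) 1).map pvTerm := by
  induction fuel generalizing k with
  | zero => simp [count_up_loopA, count_up_countB]
  | succ fuel ih =>
    obtain ⟨r, hr⟩ : Even (k * (k + 1)) := Int.even_mul_succ_self k
    have e1 : pvTerm k = 1 + r := by
      simp [pvTerm]; omega
    have e2 : pvTerm (k + 1) = 1 + r + (k + 1) := by
      have hmul : (k + 1) * (k + 1 + 1) = 2 * (r + (k + 1)) := by nlinarith [hr]
      simp [pvTerm, hmul]; omega
    simp only [count_up_loopA, count_up_countB, e1]
    by_cases h : 1 + r < x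
    · rw [if_pos h, if_pos h]
      have hcons : PySem.List.pyRange k (count_up_countB fuel x (k + 1)) 1 =
          k :: PySem.List.pyRange (k + 1) (count_up_countB fuel x (k + 1)) 1 :=
        PySem.List.pyRange_one_cons (lt_of_lt_of_le (by omega) (count_up_countB_ge fuel x (k + 1)))
      rw [hcons, List.map_cons, e1]
      rw [show (1 : Int) + r + (k + 1) = pvTerm (k + 1) from e2.symm]
      rw [show k + 1 + 1 = (k + 1) + 1 from rfl, ih (k + 1) (by omega)]
    · rw [if_neg h, if_neg h]
      simp

-- ===== VERDICT (by name: the statement is the Claim_ definition above) =====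
theorem count_up_spec : Claim_equal_count_up := by
  intro x _
  unfold Spec_count_up count_up count_up_alt
  have h := count_up_loop_eq (x - 1).toNat x 0 le_rfl
  have h0 : pvTerm 0 = 1 := by decide
  rw [h0] at h
  simpa using h
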